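-- pv_equiv track=rewrite | github.com/lingzhao11/DeTAD | DeTAD.py | extract_ranges
-- ===== SOURCE A (Python) =====
-- def extract_ranges(data, min_length=6):
--     """
--     Extract ranges of indices where values are greater than 0 and continuous,
--     and the length of the range must be greater than or equal to `min_length`.
--
--     Args:
--         data (list): List of numerical values.
--         min_length (int): Minimum length for the sequence.
--
--     Returns:
--         list: A list of ranges in the format [start, end] where the length of the range is >= min_length.
--     """
--     ranges = []
--     start = None
--
--     for i, value in enumerate(data):
--         if value > 0:  # Only consider values greater than 0
--             if start is None:
--                 start = i  # Mark the start of the range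
--         else:
--             if start is not None:
--                 # If range length is >= min_length, append it
--                 if i - start >= min_length:
--                     ranges.append([start, i - 1])  # Append as array [start, end]
--                 start = None
--     if start is not None and len(data) - start >= min_length:  # Handle last range if it extends to the end
--         ranges.append([start, len(data) - 1])  # Append as array [start, end]
--
--     return ranges
-- ===== SOURCE B (Python) =====
-- def extract_ranges(data, min_length=6):
--     """Run-scanning re-implementation: split data into maximal runs of equal
--     sign-of-positivity with two indices, keep positive runs of length >= min_length."""
--     ranges = []
--     i = 0
--     n = len(data)
--     while i < n:
--         pos = data[i] > 0
--         j = i + 1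
--         while j < n and (data[j] > 0) == pos:
--             j += 1
--         if pos and j - i >= min_length:
--             ranges.append([i, j - 1])
--         i = j
--     return ranges
-- ===== Notes on version B (the rewrite author's own statement) =====
-- stated objective: alternative
-- what changed: Replaced the start/None state machine over enumerate with a two-pointer run scanner that splits the list into maximal runs of equal positivity and emits each long-enough positive run directly.
import Mathlib
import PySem

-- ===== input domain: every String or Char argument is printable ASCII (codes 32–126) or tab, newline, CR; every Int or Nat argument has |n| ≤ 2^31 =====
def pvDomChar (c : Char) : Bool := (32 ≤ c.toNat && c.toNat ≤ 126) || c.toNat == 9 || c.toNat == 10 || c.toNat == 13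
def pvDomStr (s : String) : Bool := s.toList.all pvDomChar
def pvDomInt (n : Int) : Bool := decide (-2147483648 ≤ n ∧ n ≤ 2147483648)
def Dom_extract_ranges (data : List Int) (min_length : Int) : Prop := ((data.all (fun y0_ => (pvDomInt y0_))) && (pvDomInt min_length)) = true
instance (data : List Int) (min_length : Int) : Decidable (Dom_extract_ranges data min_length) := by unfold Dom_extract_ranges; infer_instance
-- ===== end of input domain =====

-- B replaces A's start/None state machine with a two-pointer maximal-run scanner (alternative decomposition, same cost).

-- ===== PORT A =====
-- A's enumerate loop as structural recursion over (remaining list, index i, start, ranges);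
-- the trailing `if start is not None …` of A is the [] case (there i = len(data)).
def extractRangesGo (min_length : Int) : List Int → Int → Option Int → List (List Int) → List (List Int)
  | [], i, start, ranges =>
      match start with
      | some s => if min_length ≤ i - s then ranges ++ [[s, i - 1]] else ranges
      | none => ranges
  | x :: xs, i, start, ranges =>
      if 0 < x then
        extractRangesGo min_length xs (i + 1)
          (match start with | none => some i | some s => some s) ranges
      else
        match start with
        | some s =>
            extractRangesGo min_length xs (i + 1) none
              (if min_length ≤ i - s then ranges ++ [[s, i - 1]] else ranges)
        | none => extractRangesGo min_length xs (i + 1) none ranges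

def extract_ranges (data : List Int) (min_length : Int) : List (List Int) :=
  extractRangesGo min_length data 0 none []

-- ===== PORT B =====
-- Source B's outer while loop: at offset `off`, the inner `while j < n and (data[j] > 0) == pos`
-- computes the maximal run of equal positivity (takeWhile), then jumps behind it (dropWhile).
def extractRangesAltGo (min_length : Int) (off : Int) : List Int → List (List Int)
  | [] => []
  | x :: xs =>
      let pos : Bool := decide (0 < x)
      let run := List.takeWhile (fun v => decide (0 < v) == pos) (x :: xs)
      let rest := List.dropWhile (fun v => decide (0 < v) == pos) (x :: xs)
      (if pos && decide (min_length ≤ (run.length : Int)) then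
        [[off, off + (run.length : Int) - 1]]
      else []) ++ extractRangesAltGo min_length (off + (run.length : Int)) rest
termination_by l => l.length
decreasing_by
  simp only [List.dropWhile_cons, beq_self_eq_true, if_pos, List.length_cons]
  exact Nat.lt_succ_of_le (List.length_dropWhile_le _ _)

def extract_ranges_alt (data : List Int) (min_length : Int) : List (List Int) :=
  extractRangesAltGo min_length 0 data

-- ===== PRECONDITION & SPEC =====
def Spec_extract_ranges (data : List Int) (min_length : Int) (out : List (List Int)) : Prop := out = extract_ranges_alt data min_length
instance (data : List Int) (min_length : Int) (out : List (List Int)) : Decidable (Spec_extract_ranges data min_length out) := by unfold Spec_extract_ranges; infer_instance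

-- ===== CLAIM (what is proved, stated in full; the proofs are below) =====
def Claim_equal_extract_ranges : Prop := ∀ (data : List Int) (min_length : Int), Dom_extract_ranges data min_length → Spec_extract_ranges data min_length (extract_ranges data min_length)

-- ===== LEMMAS AND PROOFS =====

-- one-step unfolding of A's loop on a cons cell
theorem aGo_cons (m x : Int) (xs : List Int) (i : Int) (start : Option Int) (ranges : List (List Int)) :
    extractRangesGo m (x :: xs) i start ranges =
      (if 0 < x then
        extractRangesGo m xs (i + 1) (match start with | none => some i | some s => some s) ranges
      else
        match start with
        | some s =>
            extractRangesGo m xs (i + 1) none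
              (if m ≤ i - s then ranges ++ [[s, i - 1]] else ranges)
        | none => extractRangesGo m xs (i + 1) none ranges) := by
  rw [extractRangesGo.eq_def]

-- skipping one nonpositive element does not change B's output
theorem altGo_skip_nonpos (m i : Int) (x : Int) (xs : List Int) (hx : ¬ 0 < x) :
    extractRangesAltGo m i (x :: xs) = extractRangesAltGo m (i + 1) xs := by
  rw [extractRangesAltGo]
  simp only [hx, decide_false, Bool.false_and, List.takeWhile_cons, List.dropWhile_cons]
  cases xs with
  | nil => simp [extractRangesAltGo]
  | cons y ys =>
      by_cases hy : 0 < y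
      · simp [hy]
      · rw [extractRangesAltGo]
        simp only [hy, decide_false, Bool.false_and, List.nil_append, List.takeWhile_cons,
          List.dropWhile_cons]
        simp only [beq_self_eq_true, if_pos]
        congr 1
        simp only [List.length_cons]
        push_cast
        ring

-- unfolding of B on a positive head: one whole positive run is consumed
theorem altGo_pos (m i : Int) (x : Int) (xs : List Int) (hx : 0 < x) :
    extractRangesAltGo m i (x :: xs) =
      (if m ≤ 1 + ((xs.takeWhile (fun v => decide (0 < v))).length : Int) then
        [[i, i + (1 + ((xs.takeWhile (fun v => decide (0 < v))).length : Int)) - 1]]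
      else []) ++
      extractRangesAltGo m (i + (1 + ((xs.takeWhile (fun v => decide (0 < v))).length : Int)))
        (xs.dropWhile (fun v => decide (0 < v))) := by
  rw [extractRangesAltGo]
  simp only [hx, decide_true, List.takeWhile_cons, List.dropWhile_cons, beq_self_eq_true,
    if_pos, Bool.true_and, List.length_cons, beq_true, decide_eq_true_eq]
  push_cast
  ring_nf

-- A with an open range (start = some s) finishes the current positive run and continues with none
theorem aGo_some (m : Int) (xs : List Int) (s i : Int) (ranges : List (List Int)) :
    extractRangesGo m xs i (some s) ranges =
      extractRangesGo m (xs.dropWhile (fun v => decide (0 < v)))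
        (i + ((xs.takeWhile (fun v => decide (0 < v))).length : Int)) none
        (if m ≤ i + ((xs.takeWhile (fun v => decide (0 < v))).length : Int) - s then
          ranges ++ [[s, i + ((xs.takeWhile (fun v => decide (0 < v))).length : Int) - 1]]
        else ranges) := by
  induction xs generalizing i with
  | nil => simp [extractRangesGo]
  | cons x xs ih =>
      by_cases hx : 0 < x
      · rw [aGo_cons]
        simp only [hx, if_pos]
        rw [ih (i + 1)]
        simp only [List.takeWhile_cons, List.dropWhile_cons, hx, decide_true, if_true,
          List.length_cons]
        have h1 : i + (((xs.takeWhile (fun v => decide (0 < v))).length + 1 : Nat) : Int)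
            = (i + 1) + ((xs.takeWhile (fun v => decide (0 < v))).length : Int) := by
          push_cast; ring
        rw [h1]
      · rw [aGo_cons]
        simp only [hx]
        simp only [List.takeWhile_cons, List.dropWhile_cons, hx, decide_false,
          Bool.false_eq_true, if_false, List.length_nil, Nat.cast_zero, add_zero]
        rw [aGo_cons]
        simp [hx]

-- main invariant: A with no open range equals accumulated ranges plus B on the remaining suffix
theorem aGo_none (m : Int) (xs : List Int) (i : Int) (ranges : List (List Int)) :
    extractRangesGo m xs i none ranges = ranges ++ extractRangesAltGo m i xs := by
  generalize hn : xs.length = n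
  induction n using Nat.strong_induction_on generalizing xs i ranges with
  | _ n ih =>
    cases xs with
    | nil => simp [extractRangesGo, extractRangesAltGo]
    | cons x xs =>
      by_cases hx : 0 < x
      · rw [aGo_cons]
        simp only [hx, if_pos]
        rw [aGo_some]
        rw [ih (xs.dropWhile (fun v => decide (0 < v))).length
              (by have := List.length_dropWhile_le (fun v => decide (0 < v)) xs
                  simp at hn; omega) _ _ _ rfl]
        rw [altGo_pos m i x xs hx]
        have h1 : i + 1 + ((xs.takeWhile (fun v => decide (0 < v))).length : Int)
            = i + (1 + ((xs.takeWhile (fun v => decide (0 < v))).length : Int)) := by ring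
        rw [h1]
        have h2 : i + (1 + ((xs.takeWhile (fun v => decide (0 < v))).length : Int)) - i
            = 1 + ((xs.takeWhile (fun v => decide (0 < v))).length : Int) := by ring
        rw [h2]
        split_ifs <;> simp
      · rw [aGo_cons]
        simp only [hx]
        rw [ih xs.length (by simp at hn; omega) _ _ _ rfl]
        rw [altGo_skip_nonpos m i x xs hx]
        simp

-- ===== VERDICT (by name: the statement is the Claim_ definition above) =====
theorem extract_ranges_spec : Claim_equal_extract_ranges := by
  intro data m _
  unfold Spec_extract_ranges extract_ranges extract_ranges_alt
  simpa using aGo_none m data 0 []
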